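-- pv_equiv track=rewrite | github.com/benjaminbeilharz/ba-thesis | src/train.py | _prepare_dialog_history
-- ===== SOURCE A (Python) =====
-- from typing import Callable, Iterable, Iterator, List, Mapping, Tuple, Union
--
-- def _prepare_dialog_history(ctx: str,
--                             dialog: Iterable) -> List[List[str]]:
--     """Prepares the dialog in pairs for the language model task
--
--     Args:
--         ctx - context of dialog
--         dialog - iterable of utterances
--
--     Returns:
--         list of history, current and next turn
--     """
--     turns = []
--     hist = ctx.replace('_comma_', ',')
--     for d in dialog:
--         current, next = d
--         turns.append([
--             hist,
--             current.replace('_comma_', ','),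
--             next.replace('_comma_', ',')
--         ])
--         hist += f' {current}'
--
--     return turns
-- ===== SOURCE B (Python) =====
-- def _prepare_dialog_history(ctx, dialog):
--     pairs = list(dialog)
--     base = ctx.replace('_comma_', ',')
--     raw = [c for c, _ in pairs]
--     return [[' '.join([base] + raw[:i]),
--              c.replace('_comma_', ','),
--              n.replace('_comma_', ',')]
--             for i, (c, n) in enumerate(pairs)]
-- ===== Notes on version B (the rewrite author's own statement) =====
-- stated objective: alternative
-- what changed: Instead of A's single pass mutating a running history string, B rebuilds each row's history independently as ' '.join of the replaced context plus the prefix slice raw[:i] of un-replaced currents, in one enumerate comprehension over staged lists.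
import Mathlib
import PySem

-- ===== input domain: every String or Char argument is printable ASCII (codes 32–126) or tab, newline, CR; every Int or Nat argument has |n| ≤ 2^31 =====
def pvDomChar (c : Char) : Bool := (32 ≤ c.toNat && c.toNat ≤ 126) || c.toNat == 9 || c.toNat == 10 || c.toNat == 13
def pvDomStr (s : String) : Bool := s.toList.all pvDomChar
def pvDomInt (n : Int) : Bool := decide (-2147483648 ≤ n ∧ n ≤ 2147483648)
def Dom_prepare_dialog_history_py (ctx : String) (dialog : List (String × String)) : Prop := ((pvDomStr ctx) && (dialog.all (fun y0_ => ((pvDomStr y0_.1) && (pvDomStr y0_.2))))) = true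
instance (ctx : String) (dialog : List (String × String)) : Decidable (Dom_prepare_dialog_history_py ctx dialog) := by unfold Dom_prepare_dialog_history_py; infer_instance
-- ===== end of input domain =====

-- B rebuilds every history row from scratch as ' '.join of the replaced context and the
-- prefix slice of raw currents (staged slices + join) instead of A's single pass mutating
-- a running history string — an alternative decomposition, not claimed faster.


-- ===== PORT A =====
-- the 'for d in dialog' loop: hist is the mutable accumulator, each iteration emits one row
def pvAloop (hist : String) : List (String × String) → List (List String)
  | [] => []
  | (current, next) :: rest =>
      [hist, PySem.Str.replace current "_comma_" ",", PySem.Str.replace next "_comma_" ","]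
        :: pvAloop (hist ++ " " ++ current) rest

def prepare_dialog_history_py (ctx : String) (dialog : List (String × String)) : List (List String) :=
  pvAloop (PySem.Str.replace ctx "_comma_" ",") dialog

-- ===== PORT B =====
-- Source B: base = replaced ctx, raw = list of raw currents; each row's history is
-- ' '.join([base] + raw[:i]), rebuilt from the prefix slice for every enumerated turn.
def prepare_dialog_history_py_alt (ctx : String) (dialog : List (String × String)) : List (List String) :=
  let base := PySem.Str.replace ctx "_comma_" ","
  let raw := dialog.map Prod.fst
  (PySem.List.enumerate dialog).map (fun p =>
    [PySem.Str.join " " (base :: PySem.List.slice raw none (some p.1)),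
     PySem.Str.replace p.2.1 "_comma_" ",",
     PySem.Str.replace p.2.2 "_comma_" ","])

-- ===== PRECONDITION & SPEC =====
def Spec_prepare_dialog_history_py (ctx : String) (dialog : List (String × String)) (out : List (List String)) : Prop := out = prepare_dialog_history_py_alt ctx dialog
instance (ctx : String) (dialog : List (String × String)) (out : List (List String)) : Decidable (Spec_prepare_dialog_history_py ctx dialog out) := by unfold Spec_prepare_dialog_history_py; infer_instance

-- ===== CLAIM (what is proved, stated in full; the proofs are below) =====
def Claim_equal_prepare_dialog_history_py : Prop := ∀ (ctx : String) (dialog : List (String × String)), Dom_prepare_dialog_history_py ctx dialog → Spec_prepare_dialog_history_py ctx dialog (prepare_dialog_history_py ctx dialog)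

-- ===== LEMMAS AND PROOFS =====
theorem strjoin_singleton (a : String) : PySem.Str.join " " [a] = a := by
  simp [PySem.Str.join, PySem.Chars.join_singleton]

theorem strjoin_cons_cons (a b : String) (l : List String) :
    PySem.Str.join " " (a :: b :: l) = PySem.Str.join " " ((a ++ " " ++ b) :: l) := by
  cases l with
  | nil => simp [PySem.Str.join, PySem.Chars.join_singleton, PySem.Chars.join_cons_cons]
  | cons x xs => simp [PySem.Str.join, PySem.Chars.join_cons_cons]

theorem enum_shift {α : Type} (xs : List α) (s : Int) :
    PySem.List.enumerate xs (s+1) = (PySem.List.enumerate xs s).map (fun p => (p.1+1, p.2)) := by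
  induction xs generalizing s with
  | nil => simp [PySem.List.enumerate]
  | cons x t ih => simp [PySem.List.enumerate_cons, ih]

theorem pvAloop_eq (base : String) (ds : List (String × String)) :
    pvAloop base ds =
      (PySem.List.enumerate ds).map (fun p =>
        [PySem.Str.join " " (base :: PySem.List.slice (ds.map Prod.fst) none (some p.1)),
         PySem.Str.replace p.2.1 "_comma_" ",",
         PySem.Str.replace p.2.2 "_comma_" ","]) := by
  induction ds generalizing base with
  | nil => simp [pvAloop, PySem.List.enumerate]
  | cons d rest ih =>
      obtain ⟨c, n⟩ := d
      rw [pvAloop, PySem.List.enumerate_cons]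
      simp only [List.map_cons]
      congr 1
      · rw [PySem.List.slice_to _ (le_refl 0)]
        simp [strjoin_singleton]
      · rw [show ((0:Int)+1) = 0+1 from rfl, enum_shift, List.map_map,
            ih (base ++ " " ++ c)]
        apply List.map_congr_left
        intro p hp
        obtain ⟨k, hk, rfl⟩ := (PySem.List.mem_enumerate_iff rest 0 p).1 hp
        simp only [Function.comp]
        have h1 : PySem.List.slice (c :: rest.map Prod.fst) none (some ((0+(k:Int))+1)) =
            c :: PySem.List.slice (rest.map Prod.fst) none (some (0+(k:Int))) := by
          rw [PySem.List.slice_to _ (by positivity), PySem.List.slice_to _ (by positivity)]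
          have : (((0:Int)+(k:Int))+1).toNat = ((0:Int)+(k:Int)).toNat + 1 := by omega
          rw [this, List.take_succ_cons]
        rw [h1, strjoin_cons_cons]

-- ===== VERDICT (by name: the statement is the Claim_ definition above) =====
theorem prepare_dialog_history_py_spec : Claim_equal_prepare_dialog_history_py := by
  intro ctx dialog _
  unfold Spec_prepare_dialog_history_py prepare_dialog_history_py prepare_dialog_history_py_alt
  exact pvAloop_eq _ _
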